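-- pv_equiv track=rewrite | github.com/DarkAce65/advent-of-code | 2022/day17.py | prune_rocks
-- ===== SOURCE A (Python) =====
-- Position = tuple[int, int]
--
-- def find_height_path_to_right(
--     x: int, y: int, existing_rock: set[Position]
-- ) -> list[int] | None:
--     if x == 6:
--         return [y]
--     for dy in range(1, -2, -1):
--         if (x + 1, y + dy) in existing_rock:
--             path = find_height_path_to_right(x + 1, y + dy, existing_rock)
--             if path is not None:
--                 path.insert(0, y + dy)
--                 return path
--
--     return None
--
-- def prune_rocks(existing_rock: set[Position]) -> tuple[set[Position], int]:
--     try: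
--         max_left = max(y for x, y in existing_rock if x == 0)
--     except ValueError:
--         return (existing_rock, 0)
--     heights = find_height_path_to_right(0, max_left, existing_rock)
--     if heights is None:
--         return (existing_rock, 0)
--
--     heights.insert(0, max_left)
--     offset = min(heights)
--     return ({(x, y - offset) for x, y in existing_rock if y >= heights[x]}, offset)
-- ===== SOURCE B (Python) =====
-- def prune_rocks(existing_rock):
--     left = [y for x, y in existing_rock if x == 0]
--     if not left:
--         return (existing_rock, 0)
--     max_left = max(left)
--     heights = None
--     stack = [(0, max_left, [max_left])]
--     while stack:
--         x, y, path = stack.pop()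
--         if x == 6:
--             heights = path + [y]
--             break
--         for dy in (-1, 0, 1):  # reverse priority: dy=+1 is popped first, as in the recursive search
--             if (x + 1, y + dy) in existing_rock:
--                 stack.append((x + 1, y + dy, path + [y + dy]))
--     if heights is None:
--         return (existing_rock, 0)
--     offset = min(heights)
--     return ({(x, y - offset) for x, y in existing_rock if y >= heights[x]}, offset)
-- ===== Notes on version B (the rewrite author's own statement) =====
-- stated objective: alternative
-- what changed: The recursive depth-first floor-path finder (find_height_path_to_right) is replaced by an explicit stack-based DFS loop inside prune_rocks (states (x, y, path) pushed in reverse dy priority so the preorder and first-found path are identical), and the try/except ValueError around max() is replaced by an explicit emptiness check on the column-0 list.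
import Mathlib
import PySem

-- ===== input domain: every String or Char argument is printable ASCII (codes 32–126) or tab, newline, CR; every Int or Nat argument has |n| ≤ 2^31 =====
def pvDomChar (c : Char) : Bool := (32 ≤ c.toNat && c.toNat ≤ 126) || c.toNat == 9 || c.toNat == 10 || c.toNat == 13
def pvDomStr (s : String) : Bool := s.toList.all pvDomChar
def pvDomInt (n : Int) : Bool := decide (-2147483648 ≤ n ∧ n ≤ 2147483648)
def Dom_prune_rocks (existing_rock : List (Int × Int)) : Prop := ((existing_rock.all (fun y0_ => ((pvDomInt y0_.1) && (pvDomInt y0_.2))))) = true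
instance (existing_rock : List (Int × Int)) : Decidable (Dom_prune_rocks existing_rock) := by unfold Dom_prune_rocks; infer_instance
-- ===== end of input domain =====

-- B replaces the recursive depth-first floor-path search by an explicit stack-based DFS loop
-- (same preorder, dy = +1,0,-1 priority via reversed pushes); objective: alternative decomposition.

-- ===== PORT A =====
-- find_height_path_to_right, step for step.  The fuel argument only makes the recursion
-- structural; prune_rocks calls it with fuel 7, which is never exhausted from x = 0
-- (x increases by 1 per call and the base case is x == 6, depth ≤ 6).
mutual
def findPathA (fuel : Nat) (x y : Int) (rock : List (Int × Int)) : Option (List Int) :=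
  match fuel with
  | 0 => none
  | f + 1 =>
    if x = 6 then some [y]
    else tryDysA f x y rock (PySem.List.pyRange 1 (-2) (-1))   -- for dy in range(1, -2, -1)
  termination_by (fuel, 0)

def tryDysA (f : Nat) (x y : Int) (rock : List (Int × Int)) (dys : List Int) : Option (List Int) :=
  match dys with
  | [] => none
  | dy :: rest =>
    if (x + 1, y + dy) ∈ rock then
      match findPathA f (x + 1) (y + dy) rock with
      | some p => some ((y + dy) :: p)      -- path.insert(0, y + dy); return path
      | none => tryDysA f x y rock rest
    else tryDysA f x y rock rest
  termination_by (f, dys.length + 1)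
end

def prune_rocks (existing_rock : List (Int × Int)) : (List (Int × Int)) × Int :=
  let zs := (existing_rock.filter (fun p => p.1 == 0)).map (fun p => p.2)
  match PySem.List.max? zs (fun y => y) with
  | none => (existing_rock, 0)              -- except ValueError (empty max)
  | some max_left =>
    match findPathA 7 0 max_left existing_rock with
    | none => (existing_rock, 0)            -- heights is None
    | some path =>
      let heights := max_left :: path       -- heights.insert(0, max_left)
      let offset := (PySem.List.min? heights (fun y => y)).getD 0  -- heights nonempty, min? is some
      ((existing_rock.filter (fun p =>
          match PySem.List.pyGet? heights p.1 with   -- heights[x]; none = IndexError, excluded by Pre_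
          | some h => decide (h ≤ p.2)
          | none => false)).map (fun p => (p.1, p.2 - offset)), offset)

-- ===== PORT B =====
-- Explicit stack DFS (head of the list = top of the stack).  Python appends dy = -1, 0, 1 and
-- pops from the end, so the list-head stack receives them in order dy = 1, 0, -1.  The fuel
-- only makes the loop structural; 4374 ≥ 2·3^7 - 1 bounds the pops from the start state.
def dfsB (fuel : Nat) (rock : List (Int × Int)) (stack : List (Int × Int × List Int)) : Option (List Int) :=
  match fuel, stack with
  | _, [] => none
  | 0, _ :: _ => none
  | f + 1, (x, y, path) :: rest =>
    if x = 6 then some (path ++ [y])        -- heights = path + [y]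
    else
      dfsB f rock
        ((List.filterMap (fun dy =>
            if (x + 1, y + dy) ∈ rock then some (x + 1, y + dy, path ++ [y + dy]) else none)
          [1, 0, -1]) ++ rest)

def prune_rocks_alt (existing_rock : List (Int × Int)) : (List (Int × Int)) × Int :=
  let left := (existing_rock.filter (fun p => p.1 == 0)).map (fun p => p.2)
  if left.isEmpty then (existing_rock, 0)
  else
    let max_left := (PySem.List.max? left (fun y => y)).getD 0   -- left nonempty, max? is some
    match dfsB 4374 existing_rock [(0, max_left, [max_left])] with
    | none => (existing_rock, 0)            -- heights is None
    | some heights =>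
      let offset := (PySem.List.min? heights (fun y => y)).getD 0
      ((existing_rock.filter (fun p =>
          match PySem.List.pyGet? heights p.1 with   -- heights[x]; none = IndexError, excluded by Pre_
          | some h => decide (h ≤ p.2)
          | none => false)).map (fun p => (p.1, p.2 - offset)), offset)

-- ===== PRECONDITION & SPEC =====
-- Pre_ excludes EXACTLY the inputs on which Python A (and B alike) raises IndexError:
-- heights has length 8, so heights[x] raises exactly when a connected floor path exists
-- (stated declaratively below as a chain of rocks in columns 1..6, each within ±1 of the
-- previous, starting within ±1 of column 0's maximum y) AND some rock has x outside [-8, 7].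
-- Pre_ is the complement; A returns a value on every input admitted and on no input excluded.
def Pre_prune_rocks (existing_rock : List (Int × Int)) : Prop :=
  (∀ p ∈ existing_rock, -8 ≤ p.1 ∧ p.1 ≤ 7) ∨
  ¬ (∃ p0 ∈ existing_rock, p0.1 = 0 ∧ (∀ q ∈ existing_rock, q.1 = 0 → q.2 ≤ p0.2) ∧
      ∃ p1 ∈ existing_rock, ∃ p2 ∈ existing_rock, ∃ p3 ∈ existing_rock,
      ∃ p4 ∈ existing_rock, ∃ p5 ∈ existing_rock, ∃ p6 ∈ existing_rock,
        p1.1 = 1 ∧ p2.1 = 2 ∧ p3.1 = 3 ∧ p4.1 = 4 ∧ p5.1 = 5 ∧ p6.1 = 6 ∧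
        (p1.2 - p0.2).natAbs ≤ 1 ∧ (p2.2 - p1.2).natAbs ≤ 1 ∧ (p3.2 - p2.2).natAbs ≤ 1 ∧
        (p4.2 - p3.2).natAbs ≤ 1 ∧ (p5.2 - p4.2).natAbs ≤ 1 ∧ (p6.2 - p5.2).natAbs ≤ 1)
instance (existing_rock : List (Int × Int)) : Decidable (Pre_prune_rocks existing_rock) := by
  unfold Pre_prune_rocks; infer_instance
def pvWitness_prune_rocks : (List (Int × Int)) := [(0, 0), (1, 1), (2, 1)]
def Spec_prune_rocks (existing_rock : List (Int × Int)) (out : (List (Int × Int)) × Int) : Prop := out = prune_rocks_alt existing_rock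
instance (existing_rock : List (Int × Int)) (out : (List (Int × Int)) × Int) : Decidable (Spec_prune_rocks existing_rock out) := by unfold Spec_prune_rocks; infer_instance

-- ===== CLAIM (what is proved, stated in full; the proofs are below) =====
def Claim_equal_prune_rocks : Prop := ∀ (existing_rock : List (Int × Int)), Dom_prune_rocks existing_rock → Pre_prune_rocks existing_rock → Spec_prune_rocks existing_rock (prune_rocks existing_rock)

-- ===== LEMMAS AND PROOFS =====

-- Iteration count of the DFS subtree rooted at (x, y), with the same fuel discipline as findPathA.
mutual
def cntA (fuel : Nat) (x y : Int) (rock : List (Int × Int)) : Nat :=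
  match fuel with
  | 0 => 1
  | f + 1 => if x = 6 then 1 else 1 + childCnt f x y rock [1, 0, -1]
  termination_by (fuel, 0)

def childCnt (f : Nat) (x y : Int) (rock : List (Int × Int)) (dys : List Int) : Nat :=
  match dys with
  | [] => 0
  | dy :: rest =>
    (if (x + 1, y + dy) ∈ rock then cntA f (x + 1) (y + dy) rock else 0) + childCnt f x y rock rest
  termination_by (f, dys.length + 1)
end

def childStates (x y : Int) (path : List Int) (rock : List (Int × Int)) (dys : List Int) :
    List (Int × Int × List Int) :=
  dys.filterMap (fun dy =>
    if (x + 1, y + dy) ∈ rock then some (x + 1, y + dy, path ++ [y + dy]) else none)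

theorem cntA_le (f : Nat) : ∀ (x y : Int) (rock : List (Int × Int)), cntA f x y rock ≤ 2 * 3 ^ f - 1 := by
  induction f with
  | zero => intro x y rock; simp [cntA]
  | succ f ih =>
    intro x y rock
    have h1 := ih (x + 1) (y + 1) rock
    have h0 := ih (x + 1) (y + 0) rock
    have hm := ih (x + 1) (y + -1) rock
    have h3 : (3 : Nat) ^ (f + 1) = 3 * 3 ^ f := by rw [pow_succ, Nat.mul_comm]
    have hp : 1 ≤ (3 : Nat) ^ f := Nat.one_le_pow _ _ (by norm_num)
    simp only [cntA, childCnt]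
    split_ifs <;> omega

-- The stack DFS, run on (x, y, path) on top of any rest-stack with enough fuel for the subtree,
-- returns path ++ p when the recursive search returns p, and falls through to the rest otherwise.
theorem dfs_sim (f : Nat) :
    ∀ (x y : Int) (rock : List (Int × Int)) (path : List Int)
      (rest : List (Int × Int × List Int)) (fd : Nat),
      x ≤ 6 → (6 - x).toNat < f →
      dfsB (cntA f x y rock + fd) rock ((x, y, path) :: rest)
        = match findPathA f x y rock with
          | some p => some (path ++ p)
          | none => dfsB fd rock rest := by
  induction f with
  | zero => intro x y rock path rest fd hx hf; omega
  | succ f ih =>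
    intro x y rock path rest fd hx hf
    by_cases hx6 : x = 6
    · subst hx6
      have hc : cntA (f + 1) 6 y rock = 1 := by simp [cntA]
      rw [hc, Nat.add_comm]
      simp [dfsB, findPathA]
    · have hxlt : x < 6 := lt_of_le_of_ne hx hx6
      have hcnt : cntA (f + 1) x y rock = 1 + childCnt f x y rock [1, 0, -1] := by
        simp [cntA, hx6]
      have hrange : PySem.List.pyRange 1 (-2) (-1) = ([1, 0, -1] : List Int) := by decide
      have hfp : findPathA (f + 1) x y rock = tryDysA f x y rock [1, 0, -1] := by
        rw [findPathA]; simp [hx6, hrange]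
      have hfuel : cntA (f + 1) x y rock + fd = (childCnt f x y rock [1, 0, -1] + fd) + 1 := by omega
      rw [hfuel, hfp]
      have hstep : dfsB ((childCnt f x y rock [1, 0, -1] + fd) + 1) rock ((x, y, path) :: rest)
          = dfsB (childCnt f x y rock [1, 0, -1] + fd) rock
              (childStates x y path rock [1, 0, -1] ++ rest) := by
        simp [dfsB, hx6, childStates]
      rw [hstep]
      have inner : ∀ (dys : List Int) (fd : Nat),
          dfsB (childCnt f x y rock dys + fd) rock (childStates x y path rock dys ++ rest)
            = match tryDysA f x y rock dys with
              | some p => some (path ++ p)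
              | none => dfsB fd rock rest := by
        intro dys
        induction dys with
        | nil => intro fd; simp [childCnt, childStates, tryDysA]
        | cons dy dys ihd =>
          intro fd
          by_cases hm : (x + 1, y + dy) ∈ rock
          · have hcc : childCnt f x y rock (dy :: dys)
                = cntA f (x + 1) (y + dy) rock + childCnt f x y rock dys := by
              simp [childCnt, hm]
            have hcs : childStates x y path rock (dy :: dys)
                = (x + 1, y + dy, path ++ [y + dy]) :: childStates x y path rock dys := by
              simp [childStates, hm]
            have hx' : x + 1 ≤ 6 := by omega
            have hf' : (6 - (x + 1)).toNat < f := by omega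
            rw [hcc, hcs, Nat.add_assoc, List.cons_append,
              ih (x + 1) (y + dy) rock (path ++ [y + dy])
                (childStates x y path rock dys ++ rest) (childCnt f x y rock dys + fd) hx' hf']
            cases hrec : findPathA f (x + 1) (y + dy) rock with
            | some p =>
              have ht : tryDysA f x y rock (dy :: dys) = some ((y + dy) :: p) := by
                simp [tryDysA, hm, hrec]
              rw [ht]; simp
            | none =>
              have ht : tryDysA f x y rock (dy :: dys) = tryDysA f x y rock dys := by
                simp [tryDysA, hm, hrec]
              rw [ht]; exact ihd fd
          · have : childCnt f x y rock (dy :: dys) = childCnt f x y rock dys := by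
              simp [childCnt, hm]
            rw [this]
            have : childStates x y path rock (dy :: dys) = childStates x y path rock dys := by
              simp [childStates, hm]
            rw [this, ihd fd]
            simp [tryDysA, hm]
      exact inner [1, 0, -1] fd

-- ===== VERDICT (by name: the statement is the Claim_ definition above) =====
theorem prune_rocks_spec : Claim_equal_prune_rocks := by
  intro rock _hdom _hpre
  unfold Spec_prune_rocks
  unfold prune_rocks prune_rocks_alt
  cases hmax : PySem.List.max? ((rock.filter (fun p => p.1 == 0)).map (fun p => p.2)) (fun y => y) with
  | none =>
    have hz : (rock.filter (fun p => p.1 == 0)).map (fun p => p.2) = [] := by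
      exact (PySem.List.max?_eq_none_iff _ _).mp hmax
    have h0 : PySem.List.max? ([] : List Int) (fun y => y) = none :=
      (PySem.List.max?_eq_none_iff _ _).mpr rfl
    simp [hz, h0]
  | some ml =>
    have hne : ((rock.filter (fun p => p.1 == 0)).map (fun p => p.2)) ≠ [] := by
      intro h; rw [h] at hmax; simp [PySem.List.max?] at hmax
    have hie : (((rock.filter (fun p => p.1 == 0)).map (fun p => p.2)).isEmpty) = false := by
      simpa [List.isEmpty_iff] using hne
    have hcle : cntA 7 0 ml rock ≤ 4374 := by
      have := cntA_le 7 0 ml rock; omega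
    obtain ⟨fd, hfd⟩ : ∃ fd, cntA 7 0 ml rock + fd = 4374 := ⟨4374 - cntA 7 0 ml rock, by omega⟩
    have hsim := dfs_sim 7 0 ml rock [ml] [] fd (by norm_num) (by norm_num)
    rw [hfd] at hsim
    cases hfp : findPathA 7 0 ml rock with
    | none =>
      rw [hfp] at hsim
      have hnil : dfsB fd rock [] = none := by simp [dfsB]
      simp only [hnil] at hsim
      simp [hmax, hie, hfp, hsim]
    | some p =>
      rw [hfp] at hsim
      simp only [] at hsim
      simp [hmax, hie, hfp, hsim]
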